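-- pv_equiv track=rewrite | github.com/xavierfeltin/mtg_data_mining | lcm_analyzer.py | occurence_delivery
-- ===== SOURCE A (Python) =====
-- def occurence_delivery(p_database):
--     """
--     Perform the occurence delivery algorithm to get all the conditional databases P union e, for all items e
--     :param p_database: the conditional database Tp
--     :return: buckets for all items e in p_database
--     """
--     base = [] #list of items in p_database
--     buckets = [] #list of buckets for all items in p_database
--     for transaction in p_database:
--         for item in transaction:
--             if item not in base:
--                 base.append(item)
--                 buckets.append([item])
--             else:
--                 buckets[base.index(item)].append(item)
--     return buckets
-- ===== SOURCE B (Python) =====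
-- def occurence_delivery(p_database):
--     """Count occurrences of each item in one pass (dict keeps first-appearance
--     order), then build each bucket as item repeated count times."""
--     counts = {}
--     for transaction in p_database:
--         for item in transaction:
--             counts[item] = counts.get(item, 0) + 1
--     return [[item] * c for item, c in counts.items()]
-- ===== Notes on version B (the rewrite author's own statement) =====
-- stated objective: faster
-- what changed: Replaces the incremental bucket build with its O(n^2) list membership test and list.index scan per item by a single counting pass over a dict followed by a separate pass materialising each bucket as [item]*count.
import Mathlib
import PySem

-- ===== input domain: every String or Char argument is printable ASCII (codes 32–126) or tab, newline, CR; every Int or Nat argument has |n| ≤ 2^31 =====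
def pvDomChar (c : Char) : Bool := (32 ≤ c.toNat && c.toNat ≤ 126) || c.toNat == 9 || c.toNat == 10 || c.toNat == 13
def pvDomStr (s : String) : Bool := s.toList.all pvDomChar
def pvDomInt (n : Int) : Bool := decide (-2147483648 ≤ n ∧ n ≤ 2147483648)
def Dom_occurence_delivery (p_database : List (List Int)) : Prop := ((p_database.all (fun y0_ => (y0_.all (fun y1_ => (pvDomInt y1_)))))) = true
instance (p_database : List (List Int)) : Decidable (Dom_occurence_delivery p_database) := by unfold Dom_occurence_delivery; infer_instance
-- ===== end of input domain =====

-- B replaces A's incremental bucket build (membership scan + list.index per item)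
-- by one counting pass into a dict and a second pass emitting [item]*count per key.


-- ===== PORT A =====
-- one item of A's inner loop: `if item not in base: … else: buckets[base.index(item)].append(item)`
def occStepA (st : List Int × List (List Int)) (item : Int) : List Int × List (List Int) :=
  if item ∉ st.1 then
    (st.1 ++ [item], st.2 ++ [[item]])
  else
    -- base.index(item): always succeeds here since item ∈ base (the .getD 0 is never taken)
    let i := (PySem.List.index? st.1 item).getD 0
    (st.1, st.2.set i (st.2.getD i [] ++ [item]))

def occurence_delivery (p_database : List (List Int)) : List (List Int) :=
  (p_database.foldl (fun st transaction => transaction.foldl occStepA st) ([], [])).2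

-- ===== PORT B =====
def occurence_delivery_alt (p_database : List (List Int)) : List (List Int) :=
  let counts : PySem.Dict Int Int :=
    p_database.foldl (fun d transaction =>
      transaction.foldl (fun d item => d.insert item (d.getD item 0 + 1)) d) PySem.Dict.empty
  counts.items.map (fun p => List.replicate p.2.toNat p.1)

-- ===== PRECONDITION & SPEC =====
def Spec_occurence_delivery (p_database : List (List Int)) (out : List (List Int)) : Prop := out = occurence_delivery_alt p_database
instance (p_database : List (List Int)) (out : List (List Int)) : Decidable (Spec_occurence_delivery p_database out) := by unfold Spec_occurence_delivery; infer_instance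

-- ===== CLAIM (what is proved, stated in full; the proofs are below) =====
def Claim_equal_occurence_delivery : Prop := ∀ (p_database : List (List Int)), Dom_occurence_delivery p_database → Spec_occurence_delivery p_database (occurence_delivery p_database)

-- ===== LEMMAS AND PROOFS =====

theorem index?_of_mem (l : List Int) (x : Int) (h : x ∈ l) :
    PySem.List.index? l x = some (l.idxOf x) := by
  rw [PySem.List.index?_eq_idxOf?]
  induction l with
  | nil => simp at h
  | cons a t ih =>
    by_cases hax : a = x
    · subst hax; simp [List.idxOf?_cons]
    · have h' : x ∈ t := by simpa [Ne.symm hax] using h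
      simp [List.idxOf?_cons, hax, ih h', beq_false_of_ne hax]

-- replacing the value at one key of a Nodup list changes the mapped list at exactly one index
theorem map_eq_set_idxOf {β : Type} (S : List Int) (f g : Int → β) (x : Int)
    (hnd : S.Nodup) (hx : x ∈ S) (hfg : ∀ k ∈ S, k ≠ x → g k = f k) :
    S.map g = (S.map f).set (S.idxOf x) (g x) := by
  induction S with
  | nil => simp at hx
  | cons a t ih =>
    by_cases hax : a = x
    · subst hax
      have : ∀ k ∈ t, g k = f k := fun k hk =>
        hfg k (List.mem_cons_of_mem _ hk) (fun hkx => (List.nodup_cons.mp hnd).1 (hkx ▸ hk))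
      simp [List.map_congr_left this]
    · have hx' : x ∈ t := by simpa [Ne.symm hax] using hx
      have hga : g a = f a := hfg a List.mem_cons_self hax
      simp [List.idxOf_cons, beq_false_of_ne hax, hga,
        ih (List.nodup_cons.mp hnd).2 hx' (fun k hk hkx => hfg k (List.mem_cons_of_mem _ hk) hkx)]

-- characterization of A's fold over the flattened item stream
theorem occ_flat (l : List Int) :
    l.foldl occStepA ([], []) =
      (PySem.Set.ofList l, (PySem.Set.ofList l).map (fun k => List.replicate (l.count k) k)) := by
  induction l using List.reverseRecOn with
  | nil => simp [PySem.Set.ofList]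
  | append_singleton l x ih =>
    rw [List.foldl_append, ih, PySem.Set.ofList_append_singleton]
    set S := PySem.Set.ofList l with hS
    have hnd : S.Nodup := PySem.Set.nodup_ofList l
    by_cases hx : x ∈ l
    · have hxS : x ∈ S := (PySem.Set.mem_ofList l x).mpr hx
      have hi : S.idxOf x < S.length := List.idxOf_lt_length_of_mem hxS
      have hcount : ∀ k, k ≠ x → (l ++ [x]).count k = l.count k := by
        intro k hk; simp [List.count_append, Ne.symm hk]
      have hgetD :
          ((S.map fun k => List.replicate (l.count k) k).getD (S.idxOf x) []) =
            List.replicate (l.count x) x := by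
        rw [List.getD_eq_getElem _ _ (by simpa using hi)]
        simp [List.getElem_idxOf hi]
      rw [List.foldl_cons, List.foldl_nil, PySem.Set.add_of_mem hxS]
      show (if x ∉ S then _ else _) = _
      rw [if_neg (by simpa using hxS)]
      simp only [index?_of_mem S x hxS, Option.getD_some]
      rw [hgetD,
        map_eq_set_idxOf S (fun k => List.replicate (l.count k) k)
          (fun k => List.replicate ((l ++ [x]).count k) k) x hnd hxS
          (fun k _ hk => by simp only [hcount k hk])]
      have : (l ++ [x]).count x = l.count x + 1 := by simp [List.count_append]
      rw [this, List.replicate_succ']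
    · have hxS : x ∉ S := fun h => hx ((PySem.Set.mem_ofList l x).mp h)
      have hmap : ∀ k ∈ S, List.replicate ((l ++ [x]).count k) k = List.replicate (l.count k) k := by
        intro k hk
        have : k ≠ x := fun h => hxS (h ▸ hk)
        simp [List.count_append, Ne.symm this]
      rw [List.foldl_cons, List.foldl_nil, PySem.Set.add_of_not_mem hxS]
      show (if x ∉ S then _ else _) = _
      rw [if_pos hxS]
      rw [List.map_append, List.map_congr_left hmap]
      simp [List.count_eq_zero_of_not_mem hx]

-- ===== VERDICT (by name: the statement is the Claim_ definition above) =====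
theorem occurence_delivery_spec : Claim_equal_occurence_delivery := by
  intro p _
  unfold Spec_occurence_delivery occurence_delivery occurence_delivery_alt
  rw [← List.foldl_flatten, ← List.foldl_flatten,
    PySem.Dict.foldl_insert_getD_add_one_eq_counter, occ_flat]
  simp [PySem.Dict.items_counter, List.map_map, Function.comp_def]
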